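-- pv_equiv track=rewrite | github.com/Gothdn/HackerRankChallenges | BeautifulPairs.py | beautifulPairs
-- ===== SOURCE A (Python) =====
-- def beautifulPairs(A, B):
--     n = len(A)
--     count = [0 for x in range(0, 1001)]
--     for _ in A:
--         count[_] += 1
--
--     pairs = 0
--     for _ in B:
--         if count[_] > 0:
--             count[_] -= 1
--             pairs += 1
--     if pairs == n:
--         return(pairs - 1)
--     else:
--         return(pairs + 1)
-- ===== SOURCE B (Python) =====
-- def beautifulPairs(A, B):
--     countA = [0] * 1001
--     countB = [0] * 1001
--     for v in A:
--         countA[v] += 1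
--     for v in B:
--         countB[v] += 1
--     pairs = sum(min(x, y) for x, y in zip(countA, countB))
--     return pairs - 1 if pairs == len(A) else pairs + 1
-- ===== Notes on version B (the rewrite author's own statement) =====
-- stated objective: alternative
-- what changed: B builds two independent histograms (for A and B) and computes the pair count as the elementwise sum of mins, instead of A's conditional-decrement scan of B against a single shared count array; the final +/-1 adjustment is identical.
import Mathlib
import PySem

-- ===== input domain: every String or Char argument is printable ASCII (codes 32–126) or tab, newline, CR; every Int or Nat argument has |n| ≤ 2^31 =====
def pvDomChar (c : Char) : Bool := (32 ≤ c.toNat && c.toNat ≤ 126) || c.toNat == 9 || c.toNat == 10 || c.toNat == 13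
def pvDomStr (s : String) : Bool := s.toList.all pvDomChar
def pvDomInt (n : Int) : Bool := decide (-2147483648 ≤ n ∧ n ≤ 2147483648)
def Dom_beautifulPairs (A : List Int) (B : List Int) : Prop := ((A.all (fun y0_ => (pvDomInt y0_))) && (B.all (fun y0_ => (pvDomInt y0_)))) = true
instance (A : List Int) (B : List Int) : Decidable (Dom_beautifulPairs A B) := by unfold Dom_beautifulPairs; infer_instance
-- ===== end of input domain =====

-- B replaces A's conditional-decrement scan of B over one shared count array by two
-- independent histograms and an elementwise sum of mins; same final +/-1 adjustment.

-- ===== PORT A =====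
def beautifulPairs (A : List Int) (B : List Int) : Int :=
  let n := A.length
  let count := List.replicate 1001 (0 : Int)
  let count := A.foldl (fun c v => PySem.List.pySetD c v (PySem.List.pyGetD c v 0 + 1)) count
  let st := B.foldl (fun (st : List Int × Int) v =>
      if PySem.List.pyGetD st.1 v 0 > 0 then
        (PySem.List.pySetD st.1 v (PySem.List.pyGetD st.1 v 0 - 1), st.2 + 1)
      else st) (count, (0 : Int))
  if st.2 = (n : Int) then st.2 - 1 else st.2 + 1

-- ===== PORT B =====
def beautifulPairs_alt (A : List Int) (B : List Int) : Int :=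
  let countA := A.foldl (fun c v => PySem.List.pySetD c v (PySem.List.pyGetD c v 0 + 1)) (List.replicate 1001 (0 : Int))
  let countB := B.foldl (fun c v => PySem.List.pySetD c v (PySem.List.pyGetD c v 0 + 1)) (List.replicate 1001 (0 : Int))
  let pairs := ((countA.zip countB).map (fun p => min p.1 p.2)).sum
  if pairs = (A.length : Int) then pairs - 1 else pairs + 1

-- ===== PRECONDITION & SPEC =====
-- Pre_ excludes exactly the inputs where Python A raises IndexError (an element outside
-- the count array's valid index range [-1001, 1000]); B raises there identically.
def Pre_beautifulPairs (A : List Int) (B : List Int) : Prop :=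
  (∀ v ∈ A, PySem.Raise.InRange 1001 v) ∧ (∀ v ∈ B, PySem.Raise.InRange 1001 v)
instance (A : List Int) (B : List Int) : Decidable (Pre_beautifulPairs A B) := by unfold Pre_beautifulPairs; infer_instance

def pvWitness_beautifulPairs : List Int × List Int := ([1, 2, 2, 4], [2, 3, 2])

def Spec_beautifulPairs (A : List Int) (B : List Int) (out : Int) : Prop := out = beautifulPairs_alt A B
instance (A : List Int) (B : List Int) (out : Int) : Decidable (Spec_beautifulPairs A B out) := by unfold Spec_beautifulPairs; infer_instance

-- ===== CLAIM (what is proved, stated in full; the proofs are below) =====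
def Claim_equal_beautifulPairs : Prop := ∀ (A : List Int) (B : List Int), Dom_beautifulPairs A B → Pre_beautifulPairs A B → Spec_beautifulPairs A B (beautifulPairs A B)

-- ===== LEMMAS AND PROOFS =====

-- the count-array slot Python's (possibly negative) index v lands on
def pvIdx (v : Int) : Nat := (v.emod 1001).toNat

-- how many elements of L land on slot i
def pvCnt (L : List Int) (i : Nat) : Int := (L.countP (fun v => pvIdx v == i) : Nat)

-- the histogram-bump step (count[v] += 1)
def pvBump (c : List Int) (v : Int) : List Int :=
  PySem.List.pySetD c v (PySem.List.pyGetD c v 0 + 1)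

def pvSum (c : List Int) (L : List Int) : Int :=
  ∑ i ∈ Finset.range 1001, min (c.getD i 0) (pvCnt L i)

lemma pvEmod_bounds (v : Int) : 0 ≤ v.emod 1001 ∧ v.emod 1001 < 1001 :=
  ⟨Int.emod_nonneg v (by norm_num), Int.emod_lt_of_pos v (by norm_num)⟩

lemma pvIdx_lt (v : Int) : pvIdx v < 1001 := by
  have := pvEmod_bounds v; unfold pvIdx; omega

lemma pvIdx?_eq (v : Int) (h : PySem.Raise.InRange 1001 v) :
    PySem.List.pyIdx? 1001 v = some (pvIdx v) := by
  obtain ⟨h1, h2⟩ := h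
  have h1' : -1001 ≤ v := by exact_mod_cast h1
  have h2' : v < 1001 := by exact_mod_cast h2
  unfold PySem.List.pyIdx? pvIdx
  by_cases h3 : (0 : Int) ≤ v
  · rw [if_pos h3, if_pos (show v < ((1001 : Nat) : Int) by exact_mod_cast h2')]
    have hEq : v.emod 1001 = v := Int.emod_eq_of_lt h3 h2'
    simp [hEq]
  · rw [if_neg h3, if_pos (show -((1001 : Nat) : Int) ≤ v by exact_mod_cast h1')]
    have hEq : v.emod 1001 = v + 1001 := by
      have h := Int.add_mul_emod_self_left (a := v) (b := 1001) (c := 1)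
      rw [mul_one] at h
      have h2 : (v + 1001) % 1001 = v + 1001 := Int.emod_eq_of_lt (by omega) (by omega)
      rw [h] at h2
      exact h2
    rw [hEq]
    congr 1
    omega

lemma pyGetD_eq (c : List Int) (v : Int) (hc : c.length = 1001)
    (h : PySem.Raise.InRange 1001 v) :
    PySem.List.pyGetD c v 0 = c.getD (pvIdx v) 0 := by
  simp [PySem.List.pyGetD, PySem.List.pyGet?, hc, pvIdx?_eq v h, List.getD]

lemma pySetD_eq (c : List Int) (v x : Int) (hc : c.length = 1001)
    (h : PySem.Raise.InRange 1001 v) :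
    PySem.List.pySetD c v x = c.set (pvIdx v) x := by
  simp [PySem.List.pySetD, PySem.List.pySet?, hc, pvIdx?_eq v h]

lemma getD_set (c : List Int) (j i : Nat) (x : Int) (hj : j < c.length) :
    (c.set j x).getD i 0 = if i = j then x else c.getD i 0 := by
  by_cases hij : i = j
  · subst hij; simp [List.getD, hj]
  · simp [List.getD, hij, Ne.symm hij]

lemma getD_replicate_zero (n i : Nat) : (List.replicate n (0 : Int)).getD i 0 = 0 := by
  simp only [List.getD, List.getElem?_replicate]
  split <;> rfl

lemma pvCnt_cons (v : Int) (L : List Int) (i : Nat) :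
    pvCnt (v :: L) i = pvCnt L i + (if pvIdx v = i then 1 else 0) := by
  unfold pvCnt
  rw [List.countP_cons]
  by_cases h : pvIdx v = i <;> simp [h]

lemma pvCnt_nonneg (L : List Int) (i : Nat) : 0 ≤ pvCnt L i := by
  unfold pvCnt; positivity

lemma pvBump_length (c : List Int) (v : Int) : (pvBump c v).length = c.length := by
  unfold pvBump; exact PySem.List.length_pySetD c v _

lemma foldl_pvBump_length (L : List Int) (c : List Int) :
    (L.foldl pvBump c).length = c.length := by
  induction L generalizing c with
  | nil => rfl
  | cons v rest ih => simp [List.foldl_cons, ih, pvBump_length]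

-- histogram characterization: each slot holds its landing count
lemma hist_spec (L : List Int) : ∀ (c : List Int), c.length = 1001 →
    (∀ v ∈ L, PySem.Raise.InRange 1001 v) → ∀ i, i < 1001 →
    (L.foldl pvBump c).getD i 0 = c.getD i 0 + pvCnt L i := by
  induction L with
  | nil => intro c hc _ i hi; simp [pvCnt]
  | cons v rest ih =>
    intro c hc hL i hi
    have hv : PySem.Raise.InRange 1001 v := hL v (by simp)
    have hrest : ∀ w ∈ rest, PySem.Raise.InRange 1001 w := fun w hw => hL w (by simp [hw])
    have hb : (pvBump c v).length = 1001 := by rw [pvBump_length, hc]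
    rw [List.foldl_cons, ih (pvBump c v) hb hrest i hi]
    have hbv : pvBump c v = c.set (pvIdx v) (c.getD (pvIdx v) 0 + 1) := by
      unfold pvBump
      rw [pySetD_eq c v _ hc hv, pyGetD_eq c v hc hv]
    rw [hbv, getD_set c (pvIdx v) i _ (by rw [hc]; exact pvIdx_lt v), pvCnt_cons]
    by_cases hij : i = pvIdx v
    · subst hij
      split_ifs <;> ring
    · rw [if_neg hij, if_neg (fun h => hij h.symm)]
      ring

-- A's conditional-decrement scan computes the sum of elementwise mins
lemma scan_spec (L : List Int) : ∀ (c : List Int) (p : Int), c.length = 1001 →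
    (∀ i, 0 ≤ c.getD i 0) →
    (∀ v ∈ L, PySem.Raise.InRange 1001 v) →
    (L.foldl (fun (st : List Int × Int) v =>
      if PySem.List.pyGetD st.1 v 0 > 0 then
        (PySem.List.pySetD st.1 v (PySem.List.pyGetD st.1 v 0 - 1), st.2 + 1)
      else st) (c, p)).2 = p + pvSum c L := by
  induction L with
  | nil =>
    intro c p hc hnn _
    have hz : pvSum c [] = 0 := by
      unfold pvSum
      apply Finset.sum_eq_zero
      intro i _
      have h1 := hnn i
      have h2 : pvCnt [] i = 0 := by unfold pvCnt; simp
      rw [h2]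
      simp only [min_def]; split_ifs <;> omega
    simp [hz]
  | cons v rest ih =>
    intro c p hc hnn hL
    have hv : PySem.Raise.InRange 1001 v := hL v (by simp)
    have hrest : ∀ w ∈ rest, PySem.Raise.InRange 1001 w := fun w hw => hL w (by simp [hw])
    have hj : pvIdx v < 1001 := pvIdx_lt v
    have hjl : pvIdx v < c.length := by rw [hc]; exact hj
    rw [List.foldl_cons]
    simp only [pyGetD_eq c v hc hv, pySetD_eq c v _ hc hv]
    by_cases hpos : c.getD (pvIdx v) 0 > 0
    · rw [if_pos hpos]
      have hc' : (c.set (pvIdx v) (c.getD (pvIdx v) 0 - 1)).length = 1001 := by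
        rw [List.length_set, hc]
      have hnn' : ∀ i, 0 ≤ (c.set (pvIdx v) (c.getD (pvIdx v) 0 - 1)).getD i 0 := by
        intro i
        rw [getD_set c (pvIdx v) i _ hjl]
        split_ifs
        · omega
        · exact hnn i
      rw [ih _ (p + 1) hc' hnn' hrest]
      have hsum : pvSum c (v :: rest) = 1 + pvSum (c.set (pvIdx v) (c.getD (pvIdx v) 0 - 1)) rest := by
        unfold pvSum
        have step : ∀ i ∈ Finset.range 1001,
            min (c.getD i 0) (pvCnt (v :: rest) i)
              = min ((c.set (pvIdx v) (c.getD (pvIdx v) 0 - 1)).getD i 0) (pvCnt rest i)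
                + (if i = pvIdx v then 1 else 0) := by
          intro i _
          rw [pvCnt_cons, getD_set c (pvIdx v) i _ hjl]
          by_cases hij : i = pvIdx v
          · subst hij
            have h1 := pvCnt_nonneg rest (pvIdx v)
            simp only [min_def]; split_ifs <;> omega
          · rw [if_neg hij, if_neg hij, if_neg (fun h => hij h.symm)]
            simp
        rw [Finset.sum_congr rfl step, Finset.sum_add_distrib,
          Finset.sum_ite_eq' (Finset.range 1001) (pvIdx v) (fun _ => (1 : Int))]
        simp only [Finset.mem_range, hj, if_pos]
        ring
      rw [hsum]; ring
    · rw [if_neg hpos]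
      rw [ih c p hc hnn hrest]
      have hsum : pvSum c (v :: rest) = pvSum c rest := by
        unfold pvSum
        apply Finset.sum_congr rfl
        intro i _
        rw [pvCnt_cons]
        by_cases hij : pvIdx v = i
        · rw [if_pos hij, ← hij]
          rw [← hij] at *
          have h1 := pvCnt_nonneg rest (pvIdx v)
          simp only [min_def]; split_ifs <;> omega
        · rw [if_neg hij]; simp
      rw [hsum]

lemma zip_min_sum (xs : List Int) : ∀ (ys : List Int), xs.length = ys.length →
    ((xs.zip ys).map (fun p => min p.1 p.2)).sum
      = ∑ i ∈ Finset.range xs.length, min (xs.getD i 0) (ys.getD i 0) := by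
  induction xs with
  | nil => intro ys h; simp
  | cons x xs' ih =>
    intro ys h
    cases ys with
    | nil => simp at h
    | cons y ys' =>
      simp only [List.zip_cons_cons, List.map_cons, List.sum_cons, List.length_cons]
      rw [ih ys' (by simpa using h), Finset.sum_range_succ']
      simp only [List.getD_cons_succ, List.getD_cons_zero]
      ring

-- ===== VERDICT (by name: the statement is the Claim_ definition above) =====
theorem beautifulPairs_spec : Claim_equal_beautifulPairs := by
  intro A B _ hpre
  obtain ⟨hA, hB⟩ := hpre
  unfold Spec_beautifulPairs
  simp only [beautifulPairs, beautifulPairs_alt]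
  have hbump : (fun (c : List Int) (v : Int) =>
      PySem.List.pySetD c v (PySem.List.pyGetD c v 0 + 1)) = pvBump := by
    funext c v; rfl
  rw [hbump]
  set cA := A.foldl pvBump (List.replicate 1001 (0 : Int)) with hcA
  set cB := B.foldl pvBump (List.replicate 1001 (0 : Int)) with hcB
  have hlenA : cA.length = 1001 := by
    rw [hcA, foldl_pvBump_length, List.length_replicate]
  have hlenB : cB.length = 1001 := by
    rw [hcB, foldl_pvBump_length, List.length_replicate]
  have hnnA : ∀ i, 0 ≤ cA.getD i 0 := by
    intro i
    by_cases hi : i < 1001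
    · rw [hcA, hist_spec A _ (List.length_replicate) hA i hi, getD_replicate_zero]
      have := pvCnt_nonneg A i; omega
    · rw [List.getD_eq_default _ _ (by rw [hlenA]; omega)]
  have hscan := scan_spec B cA 0 hlenA hnnA hB
  rw [zero_add] at hscan
  have hzip : ((cA.zip cB).map (fun p => min p.1 p.2)).sum = pvSum cA B := by
    rw [zip_min_sum cA cB (by rw [hlenA, hlenB]), hlenA]
    unfold pvSum
    apply Finset.sum_congr rfl
    intro i hi
    have hcb : cB.getD i 0 = pvCnt B i := by
      have h := hist_spec B (List.replicate 1001 (0 : Int)) (List.length_replicate) hB i (Finset.mem_range.mp hi)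
      rw [getD_replicate_zero] at h
      rw [hcB, h]; ring
    rw [hcb]
  rw [hscan, hzip]
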